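-- pv_equiv track=rewrite | github.com/miliar/Code_Jam_Webscraper | solutions_python/Problem_201/116.py | f
-- ===== SOURCE A (Python) =====
-- def f(K,N):
--     if(N==K):
--         return (0,0)
--     if N == 1:
--         return ((K-1)//2 + ((K-1)&1), (K-1)//2)
--     if (N-1) & 1 == 0:
--         return f((K-1)//2, (N-1)//2)
--     else:
--         return f((K-1)//2 + ((K-1)&1), (N-1)//2 + ((N-1)&1))
-- ===== SOURCE B (Python) =====
-- def f(K, N):
--     if N == K:
--         return (0, 0)
--     while N > 1:
--         K = (K - 1) // 2 if N % 2 else K // 2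
--         N //= 2
--     return (K // 2, (K - 1) // 2)
-- ===== Notes on version B (the rewrite author's own statement) =====
-- stated objective: simpler
-- what changed: Keeps the N==K base check once up front, then replaces the three-base-case recursion by a plain while-loop that halves N (K becomes K//2 or (K-1)//2 by N's parity) and a single closed-form return (K//2,(K-1)//2).
-- outside the precondition, e.g. on f(3, 0): A returns (0, 0), B returns (1, 1); on f(-1, 0): A raises RecursionError, B returns (-1, -1)
import Mathlib
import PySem

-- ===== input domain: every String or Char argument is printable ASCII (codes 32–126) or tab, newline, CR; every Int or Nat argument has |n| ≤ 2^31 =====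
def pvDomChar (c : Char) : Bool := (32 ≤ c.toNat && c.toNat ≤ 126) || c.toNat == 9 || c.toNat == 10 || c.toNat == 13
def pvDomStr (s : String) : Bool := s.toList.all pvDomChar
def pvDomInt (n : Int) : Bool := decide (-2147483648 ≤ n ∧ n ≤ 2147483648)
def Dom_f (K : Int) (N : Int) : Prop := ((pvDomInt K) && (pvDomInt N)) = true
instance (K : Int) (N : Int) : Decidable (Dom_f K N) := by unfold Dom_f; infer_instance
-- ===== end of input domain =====

-- B replaces A's three-base-case recursion by a plain while-loop halving N plus one
-- closed-form return; objective: simpler (no asymptotic change).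

-- ===== PORT A =====
-- A's recursion totalized with fuel; the fuel-0 value (0,0) is unreachable under Pre_f
-- (inside Pre_f, N halves each step, so 64 steps always suffice for |N| ≤ 2^31).
def fGo : Nat → Int → Int → Int × Int
  | 0, _, _ => (0, 0)
  | fuel+1, K, N =>
    if N = K then (0, 0)
    else if N = 1 then
      (PySem.Int.floordiv (K-1) 2 + PySem.Int.band (K-1) 1, PySem.Int.floordiv (K-1) 2)
    else if PySem.Int.band (N-1) 1 = 0 then
      fGo fuel (PySem.Int.floordiv (K-1) 2) (PySem.Int.floordiv (N-1) 2)
    else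
      fGo fuel (PySem.Int.floordiv (K-1) 2 + PySem.Int.band (K-1) 1)
               (PySem.Int.floordiv (N-1) 2 + PySem.Int.band (N-1) 1)

def f (K : Int) (N : Int) : Int × Int := fGo 64 K N

-- ===== PORT B =====
-- the while loop: while N > 1: K = (K-1)//2 if N%2 else K//2; N //= 2; then return (K//2, (K-1)//2)
def fAltLoop (K : Int) (N : Int) : Int × Int :=
  if _h : 1 < N then
    fAltLoop (if PySem.Int.mod N 2 ≠ 0 then PySem.Int.floordiv (K-1) 2 else PySem.Int.floordiv K 2)
             (PySem.Int.floordiv N 2)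
  else
    (PySem.Int.floordiv K 2, PySem.Int.floordiv (K-1) 2)
termination_by N.toNat
decreasing_by
  rw [PySem.Int.floordiv_eq_ediv_of_pos (by norm_num)]
  omega

def f_alt (K : Int) (N : Int) : Int × Int :=
  if N = K then (0, 0) else fAltLoop K N

-- ===== PRECONDITION & SPEC =====
-- Pre_f admits the natural domain N ≥ 1 (the N-th person exists) plus the whole N==K
-- diagonal; it excludes the remaining N < 1 off-diagonal inputs, where the Python A
-- diverges with RecursionError for most K and returns a zero pair on the rest only because
-- its decaying loop state happens to reach N==K (see cites in claim.json).
def Pre_f (K : Int) (N : Int) : Prop := 1 ≤ N ∨ N = K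
instance (K : Int) (N : Int) : Decidable (Pre_f K N) := by unfold Pre_f; infer_instance
def pvWitness_f : Int × Int := (1000, 17)

def Spec_f (K : Int) (N : Int) (out : Int × Int) : Prop := out = f_alt K N
instance (K : Int) (N : Int) (out : Int × Int) : Decidable (Spec_f K N out) := by unfold Spec_f; infer_instance

-- ===== CLAIM (what is proved, stated in full; the proofs are below) =====
def Claim_equal_f : Prop := ∀ (K : Int) (N : Int), Dom_f K N → Pre_f K N → Spec_f K N (f K N)

-- ===== LEMMAS AND PROOFS =====

lemma fd2 (x : Int) : PySem.Int.floordiv x 2 = x / 2 :=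
  PySem.Int.floordiv_eq_ediv_of_pos (by norm_num)

lemma md2 (x : Int) : PySem.Int.mod x 2 = x % 2 :=
  PySem.Int.mod_eq_emod_of_pos (by norm_num)

lemma bd1 (x : Int) : PySem.Int.band x 1 = x % 2 := by
  rw [PySem.Int.band_one, md2]

-- B's loop returns (0,0) on the diagonal N = K (which is why one up-front N==K check suffices).
lemma alt_diag (n : Nat) : ∀ N : Int, N.toNat = n → 1 ≤ N → fAltLoop N N = (0, 0) := by
  induction n using Nat.strong_induction_on with
  | _ n ih =>
    intro N hn h1
    rw [fAltLoop]
    by_cases h : 1 < N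
    · rw [dif_pos h]
      have hKN : (if PySem.Int.mod N 2 ≠ 0 then PySem.Int.floordiv (N-1) 2
                  else PySem.Int.floordiv N 2) = PySem.Int.floordiv N 2 := by
        split_ifs with hodd
        · simp only [fd2, md2] at hodd ⊢; omega
        · rfl
      rw [hKN]
      exact ih (PySem.Int.floordiv N 2).toNat
        (by simp only [fd2]; omega) _ rfl (by simp only [fd2]; omega)
    · rw [dif_neg h]
      have hN1 : N = 1 := by omega
      subst hN1
      simp only [fd2]
      norm_num

lemma main_lemma (fuel : Nat) : ∀ K N : Int, 1 ≤ N → N < 2^fuel →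
    fGo fuel K N = fAltLoop K N := by
  induction fuel with
  | zero => intro K N h1 h2; simp at h2; omega
  | succ fuel ih =>
    intro K N h1 h2
    have hM : (1:Int) ≤ 2^fuel := one_le_pow₀ (by norm_num)
    have h2' : N < 2^fuel * 2 := by rw [pow_succ] at h2; exact h2
    simp only [fGo]
    by_cases hNK : N = K
    · rw [if_pos hNK]
      subst hNK
      exact (alt_diag N.toNat N rfl h1).symm
    · rw [if_neg hNK]
      by_cases hN1 : N = 1
      · rw [if_pos hN1]
        subst hN1
        rw [fAltLoop, dif_neg (by omega)]
        simp only [fd2, bd1, Prod.mk.injEq, and_true]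
        omega
      · rw [if_neg hN1]
        have hN2 : 2 ≤ N := by omega
        rw [fAltLoop, dif_pos (by omega)]
        by_cases hodd : PySem.Int.band (N-1) 1 = 0
        · rw [if_pos hodd]
          simp only [bd1] at hodd
          have hmod : ¬ PySem.Int.mod N 2 = 0 := by simp only [md2]; omega
          rw [if_pos hmod]
          have hNN : PySem.Int.floordiv (N-1) 2 = PySem.Int.floordiv N 2 := by
            simp only [fd2]; omega
          rw [ih _ _ (by simp only [fd2]; omega) (by simp only [fd2]; omega), hNN]
        · rw [if_neg hodd]
          simp only [bd1] at hodd
          have hmod : ¬ ¬ PySem.Int.mod N 2 = 0 := by simp only [md2]; omega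
          rw [if_neg (by simpa using hmod)]
          have hK : PySem.Int.floordiv (K-1) 2 + PySem.Int.band (K-1) 1
                    = PySem.Int.floordiv K 2 := by
            simp only [fd2, bd1]; omega
          have hN : PySem.Int.floordiv (N-1) 2 + PySem.Int.band (N-1) 1
                    = PySem.Int.floordiv N 2 := by
            simp only [fd2, bd1]; omega
          rw [hK, hN]
          exact ih (PySem.Int.floordiv K 2) (PySem.Int.floordiv N 2)
            (by simp only [fd2]; omega) (by simp only [fd2]; omega)

-- A returns (0,0) everywhere on the diagonal, matching B's up-front check.
lemma a_diag (K : Int) : f K K = (0, 0) := by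
  simp [f, fGo]

-- ===== VERDICT (by name: the statement is the Claim_ definition above) =====
theorem f_spec : Claim_equal_f := by
  intro K N hdom hpre
  unfold Spec_f f_alt
  by_cases hNK : N = K
  · rw [if_pos hNK, hNK, a_diag]
  · rw [if_neg hNK]
    have hpre' : 1 ≤ N := hpre.resolve_right hNK
    have hbound : N ≤ 2147483648 := by
      unfold Dom_f pvDomInt at hdom
      simp only [Bool.and_eq_true, decide_eq_true_eq] at hdom
      exact hdom.2.2
    have h64 : N < 2^64 := by
      have : (2:Int)^64 = 18446744073709551616 := by norm_num
      omega
    unfold f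
    exact main_lemma 64 K N hpre' h64
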